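-- pv_equiv track=rewrite | github.com/lisasth/Master_Thesis | wise-ft-clip/utils/data_process/generate_sample_file_for_dataset.py | get_priority_map
-- ===== SOURCE A (Python) =====
-- def get_priority_map(datasets):
--     """
--     Organize datasets by priority.
--     """
--     priority_map = {}
--     for name, info in datasets.items():
--         priority = info["priority"]
--         if priority not in priority_map:
--             priority_map[priority] = []
--         priority_map[priority].append((name, info["number of images"]))
--     return priority_map
-- ===== SOURCE B (Python) =====
-- def get_priority_map(datasets):
--     """
--     Organize datasets by priority.
--
--     Two-phase alternative: collect the distinct priorities in first-occurrence
--     order, then build each priority's group by filtering the whole dataset.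
--     """
--     order = []
--     for info in datasets.values():
--         p = info["priority"]
--         if p not in order:
--             order.append(p)
--     return {p: [(name, info["number of images"])
--                 for name, info in datasets.items()
--                 if info["priority"] == p]
--             for p in order}
-- ===== Notes on version B (the rewrite author's own statement) =====
-- stated objective: alternative
-- what changed: A builds the grouping in one pass, mutating per-priority lists inside an accumulator dict; B first collects the distinct priorities in first-occurrence order and then builds each group by a separate filtering pass over the whole dataset.
import Mathlib
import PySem

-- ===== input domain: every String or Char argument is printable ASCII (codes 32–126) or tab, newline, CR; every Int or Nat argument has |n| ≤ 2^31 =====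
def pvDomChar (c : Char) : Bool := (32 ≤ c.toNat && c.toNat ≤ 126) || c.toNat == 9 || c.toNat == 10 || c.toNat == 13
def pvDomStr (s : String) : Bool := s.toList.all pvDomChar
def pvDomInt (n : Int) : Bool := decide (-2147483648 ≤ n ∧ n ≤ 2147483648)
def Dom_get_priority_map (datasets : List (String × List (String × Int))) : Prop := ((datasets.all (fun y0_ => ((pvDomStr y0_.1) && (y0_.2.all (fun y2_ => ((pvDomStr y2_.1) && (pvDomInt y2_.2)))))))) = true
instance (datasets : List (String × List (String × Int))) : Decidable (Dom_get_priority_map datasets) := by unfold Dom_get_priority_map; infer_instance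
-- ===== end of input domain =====

-- B replaces A's one-pass dict accumulation by a two-phase grouping (distinct priorities
-- in first-occurrence order, then one filtering pass per priority); alternative, not faster.


-- shared helpers: info["priority"] and (name, info["number of images"]) (total under Pre_)
def pvKey (ni : String × List (String × Int)) : Int :=
  (PySem.Dict.mk ni.2).getD "priority" 0
def pvVal (ni : String × List (String × Int)) : String × Int :=
  (ni.1, (PySem.Dict.mk ni.2).getD "number of images" 0)

-- ===== PORT A =====
def get_priority_map (datasets : List (String × List (String × Int))) : List (Int × List (String × Int)) :=
  (datasets.foldl
    (fun priority_map ni =>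
      let priority := pvKey ni
      let priority_map :=
        if !priority_map.contains priority then priority_map.insert priority [] else priority_map
      -- priority_map[priority].append((name, info["number of images"]))
      priority_map.modify priority [] (fun l => l ++ [pvVal ni]))
    PySem.Dict.empty).items

-- ===== PORT B =====
def get_priority_map_alt (datasets : List (String × List (String × Int))) : List (Int × List (String × Int)) :=
  let order : PySem.Set Int :=
    datasets.foldl (fun order ni => PySem.Set.add order (pvKey ni)) PySem.Set.empty
  order.map (fun p =>
    (p, (datasets.filter (fun ni => pvKey ni == p)).map pvVal))

-- ===== PRECONDITION & SPEC =====
-- Pre_ excludes exactly the inputs where A raises KeyError: some info dict lacking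
-- the "priority" or "number of images" key.
def Pre_get_priority_map (datasets : List (String × List (String × Int))) : Prop :=
  ∀ ni ∈ datasets, (PySem.Dict.mk ni.2).contains "priority" = true ∧
    (PySem.Dict.mk ni.2).contains "number of images" = true
instance (datasets : List (String × List (String × Int))) : Decidable (Pre_get_priority_map datasets) := by unfold Pre_get_priority_map; infer_instance
def pvWitness_get_priority_map : (List (String × List (String × Int))) :=
  [("cats", [("priority", 1), ("number of images", 3)]),
   ("dogs", [("priority", 1), ("number of images", 2)])]

def Spec_get_priority_map (datasets : List (String × List (String × Int))) (out : List (Int × List (String × Int))) : Prop := out = get_priority_map_alt datasets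
instance (datasets : List (String × List (String × Int))) (out : List (Int × List (String × Int))) : Decidable (Spec_get_priority_map datasets out) := by unfold Spec_get_priority_map; infer_instance

-- ===== CLAIM (what is proved, stated in full; the proofs are below) =====
def Claim_equal_get_priority_map : Prop := ∀ (datasets : List (String × List (String × Int))), Dom_get_priority_map datasets → Pre_get_priority_map datasets → Spec_get_priority_map datasets (get_priority_map datasets)

-- ===== LEMMAS AND PROOFS =====

-- A's loop body: the ensure-key-then-append step is one 'modify'.
theorem pv_step_eq (d : PySem.Dict Int (List (String × Int))) (p : Int) (v : String × Int) :
    ((if !d.contains p then d.insert p [] else d).modify p [] (fun l => l ++ [v]))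
      = d.modify p [] (fun l => l ++ [v]) := by
  by_cases h : d.contains p = true
  · simp [h]
  · have h' : d.contains p = false := by simpa using h
    rw [if_pos (by simp [h'])]
    have : ∀ (e : PySem.Dict Int (List (String × Int))) f,
        e.modify p ([] : List (String × Int)) f = e.insert p (f (e.getD p [])) := fun _ _ => rfl
    rw [this, this, PySem.Dict.getD_insert_self, PySem.Dict.insert_insert_self,
      PySem.Dict.getD_of_not_contains _ _ h']

theorem pv_foldA_eq (l : List (String × List (String × Int)))
    (d : PySem.Dict Int (List (String × Int))) :
    l.foldl (fun priority_map ni =>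
        let priority := pvKey ni
        let priority_map :=
          if !priority_map.contains priority then priority_map.insert priority [] else priority_map
        priority_map.modify priority [] (fun l => l ++ [pvVal ni])) d
      = (l.map (fun ni => (pvKey ni, pvVal ni))).foldl
          (fun d p => d.modify p.1 [] (fun l => l ++ [p.2])) d := by
  induction l generalizing d with
  | nil => rfl
  | cons x xs ih =>
    simp only [List.map_cons, List.foldl_cons, pv_step_eq]
    simpa only [pv_step_eq] using ih _

theorem get_priority_map_spec : Claim_equal_get_priority_map := by
  intro datasets _ _
  unfold Spec_get_priority_map get_priority_map get_priority_map_alt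
  rw [pv_foldA_eq]
  set L := datasets.map (fun ni => (pvKey ni, pvVal ni)) with hL
  set D := L.foldl (fun d p => d.modify p.1 [] (fun l => l ++ [p.2])) PySem.Dict.empty with hD
  have hnd : D.keys.Nodup := by
    rw [hD]; exact PySem.Dict.nodup_keys_foldl_modify_key L Prod.fst _ _ _ (by simp)
  have hkeys : D.keys = PySem.Set.ofList (datasets.map pvKey) := by
    rw [hD, PySem.Dict.keys_foldl_modify_key]
    simp [PySem.Set.update, PySem.Set.ofList_eq_foldl, hL, List.foldl_map,
      PySem.Dict.keys_empty]
  have horder : datasets.foldl (fun order ni => PySem.Set.add order (pvKey ni)) PySem.Set.empty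
      = PySem.Set.ofList (datasets.map pvKey) := by
    simp [PySem.Set.ofList_eq_foldl, List.foldl_map]
  have hget : ∀ k, D.getD k [] = (datasets.filter (fun ni => pvKey ni == k)).map pvVal := by
    intro k
    rw [hD, PySem.Dict.getD_foldl_modify_append]
    simp [hL, List.filter_map, Function.comp_def]
  rw [PySem.Dict.items_eq_map_keys D hnd [], hkeys, horder]
  exact List.map_congr_left (fun k _ => by rw [hget])
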